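-- pv_equiv track=rewrite | github.com/ogiekako/pub_polycover | hardness/search_hardness_gadget.py | all_placements_intersecting_target
-- ===== SOURCE A (Python) =====
-- def rot90(cells, n):
--     return {(n - 1 - y, x) for (x, y) in cells}
--
-- def reflx(cells, n):
--     return {(n - 1 - x, y) for (x, y) in cells}
--
-- def d4_variants(cells, n):
--     r0 = cells
--     r1 = rot90(r0, n)
--     r2 = rot90(r1, n)
--     r3 = rot90(r2, n)
--     f0 = reflx(r0, n)
--     f1 = rot90(f0, n)
--     f2 = rot90(f1, n)
--     f3 = rot90(f2, n)
--     variants = []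
--     seen = set()
--     for v in [r0, r1, r2, r3, f0, f1, f2, f3]:
--         key = frozenset(v)
--         if key not in seen:
--             seen.add(key)
--             variants.append(v)
--     return variants
--
-- def shift(cells, dx, dy):
--     return {(x + dx, y + dy) for (x, y) in cells}
--
-- def intersects(a, b):
--     if len(a) > len(b):
--         a, b = b, a
--     for c in a:
--         if c in b:
--             return True
--     return False
--
-- def all_placements_intersecting_target(P, n, target):
--     varsP = d4_variants(P, n)
--     txs = [x for x, _ in target]
--     tys = [y for _, y in target]
--     tminx, tmaxx = min(txs), max(txs)
--     tminy, tmaxy = min(tys), max(tys)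
--     placements = []
--     seen = set()
--     for v in varsP:
--         vxs = [x for x, _ in v]
--         vys = [y for _, y in v]
--         vminx, vmaxx = min(vxs), max(vxs)
--         vminy, vmaxy = min(vys), max(vys)
--         for dx in range(tminx - vmaxx, tmaxx - vminx + 1):
--             for dy in range(tminy - vmaxy, tmaxy - vminy + 1):
--                 s = shift(v, dx, dy)
--                 if intersects(s, target):
--                     key = frozenset(s)
--                     if key not in seen:
--                         seen.add(key)
--                         placements.append(s)
--     return placements
-- ===== SOURCE B (Python) =====
-- # B: generates intersecting shifts directly as the Minkowski difference {t - c},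
-- # sorted, instead of scanning the bounding-box rectangle and testing intersection.
--
-- def rot90(cells, n):
--     return {(n - 1 - y, x) for (x, y) in cells}
--
-- def reflx(cells, n):
--     return {(n - 1 - x, y) for (x, y) in cells}
--
-- def d4_variants(cells, n):
--     r0 = cells
--     r1 = rot90(r0, n)
--     r2 = rot90(r1, n)
--     r3 = rot90(r2, n)
--     f0 = reflx(r0, n)
--     f1 = rot90(f0, n)
--     f2 = rot90(f1, n)
--     f3 = rot90(f2, n)
--     variants = []
--     seen = set()
--     for v in [r0, r1, r2, r3, f0, f1, f2, f3]:
--         key = frozenset(v)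
--         if key not in seen:
--             seen.add(key)
--             variants.append(v)
--     return variants
--
-- def shift(cells, dx, dy):
--     return {(x + dx, y + dy) for (x, y) in cells}
--
-- def all_placements_intersecting_target(P, n, target):
--     placements = []
--     seen = set()
--     for v in d4_variants(P, n):
--         shifts = sorted({(tx - cx, ty - cy) for (tx, ty) in target for (cx, cy) in v})
--         for (dx, dy) in shifts:
--             s = shift(v, dx, dy)
--             key = frozenset(s)
--             if key not in seen:
--                 seen.add(key)
--                 placements.append(s)
--     return placements
-- ===== Notes on version B (the rewrite author's own statement) =====
-- stated objective: faster
-- what changed: Instead of scanning every shift in the Minkowski-sum bounding-box rectangle and testing each shifted copy for intersection with the target, B generates exactly the intersecting shifts directly as the Minkowski difference {t - c : t in target, c in variant}, deduplicated with a set and sorted (which reproduces A's lexicographic scan order).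
-- crash fix: On empty P or empty target A raises ValueError (min() of an empty sequence); B returns []. — e.g. on all_placements_intersecting_target([], 0, [(0, 0)]): A raises ValueError, B returns []
import Mathlib
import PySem

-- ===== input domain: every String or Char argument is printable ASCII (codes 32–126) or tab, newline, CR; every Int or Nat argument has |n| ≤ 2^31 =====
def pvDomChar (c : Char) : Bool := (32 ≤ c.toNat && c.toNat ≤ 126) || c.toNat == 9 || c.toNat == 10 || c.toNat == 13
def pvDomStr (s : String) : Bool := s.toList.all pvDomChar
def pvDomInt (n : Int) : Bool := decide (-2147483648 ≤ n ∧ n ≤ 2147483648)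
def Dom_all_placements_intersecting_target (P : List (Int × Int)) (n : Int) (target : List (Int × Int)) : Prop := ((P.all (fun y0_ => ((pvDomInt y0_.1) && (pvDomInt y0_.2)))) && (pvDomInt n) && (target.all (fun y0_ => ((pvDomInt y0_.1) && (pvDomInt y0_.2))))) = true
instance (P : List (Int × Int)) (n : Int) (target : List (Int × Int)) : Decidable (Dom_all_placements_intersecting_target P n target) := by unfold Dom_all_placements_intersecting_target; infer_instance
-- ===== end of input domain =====

-- B replaces A's bounding-box rectangle scan + intersection test by direct generation of the
-- intersecting shifts as the sorted Minkowski difference {t - c}; equivalence of return values is proved.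
-- Python sets are modelled as insertion-ordered duplicate-free lists (PySem.Set).

-- ===== PORT A =====
-- module helpers shared by both Python files (rot90 / reflx / d4_variants / shift)
def pyrot90 (cells : List (Int × Int)) (n : Int) : List (Int × Int) :=
  PySem.Set.ofList (cells.map (fun c => (n - 1 - c.2, c.1)))

def pyreflx (cells : List (Int × Int)) (n : Int) : List (Int × Int) :=
  PySem.Set.ofList (cells.map (fun c => (n - 1 - c.1, c.2)))

-- 'key = frozenset(v); if key not in seen' — frozenset membership is SET equality, ported by hand
-- with PySem.Set.equal (exact: two frozensets are equal iff each is a subset of the other)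
def pyd4step (st : List (List (Int × Int)) × List (List (Int × Int))) (v : List (Int × Int)) :
    List (List (Int × Int)) × List (List (Int × Int)) :=
  if st.2.any (fun k => PySem.Set.equal k (PySem.Set.ofList v)) then st
  else (st.1 ++ [v], st.2 ++ [PySem.Set.ofList v])

def pyd4 (cells : List (Int × Int)) (n : Int) : List (List (Int × Int)) :=
  let r0 := cells
  let r1 := pyrot90 r0 n
  let r2 := pyrot90 r1 n
  let r3 := pyrot90 r2 n
  let f0 := pyreflx r0 n
  let f1 := pyrot90 f0 n
  let f2 := pyrot90 f1 n
  let f3 := pyrot90 f2 n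
  (([r0, r1, r2, r3, f0, f1, f2, f3].foldl pyd4step ([], [])).1)

def pyshift (cells : List (Int × Int)) (dx dy : Int) : List (Int × Int) :=
  PySem.Set.ofList (cells.map (fun c => (c.1 + dx, c.2 + dy)))

def pyintersects (a b : List (Int × Int)) : Bool :=
  if a.length > b.length then b.any (fun c => a.contains c) else a.any (fun c => b.contains c)

def all_placements_intersecting_target (P : List (Int × Int)) (n : Int) (target : List (Int × Int)) : List (List (Int × Int)) :=
  let varsP := pyd4 P n
  let txs := target.map (fun t => t.1)
  let tys := target.map (fun t => t.2)
  match PySem.List.min? txs (fun x => x), PySem.List.max? txs (fun x => x),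
        PySem.List.min? tys (fun x => x), PySem.List.max? tys (fun x => x) with
  | some tminx, some tmaxx, some tminy, some tmaxy =>
    (varsP.foldl (fun st v =>
      match PySem.List.min? (v.map (fun c => c.1)) (fun x => x), PySem.List.max? (v.map (fun c => c.1)) (fun x => x),
            PySem.List.min? (v.map (fun c => c.2)) (fun x => x), PySem.List.max? (v.map (fun c => c.2)) (fun x => x) with
      | some vminx, some vmaxx, some vminy, some vmaxy =>
        (PySem.List.pyRange (tminx - vmaxx) (tmaxx - vminx + 1) 1).foldl (fun st dx =>
          (PySem.List.pyRange (tminy - vmaxy) (tmaxy - vminy + 1) 1).foldl (fun st dy =>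
            if pyintersects (pyshift v dx dy) target = true then
              if st.2.any (fun k => PySem.Set.equal k (PySem.Set.ofList (pyshift v dx dy))) then st
              else (st.1 ++ [pyshift v dx dy], st.2 ++ [PySem.Set.ofList (pyshift v dx dy)])
            else st) st) st
      | _, _, _, _ => st)
      (([], []) : List (List (Int × Int)) × List (List (Int × Int)))).1
  | _, _, _, _ => []  -- min()/max() of an empty sequence raise ValueError: excluded by Pre_

-- ===== PORT B =====
def all_placements_intersecting_target_alt (P : List (Int × Int)) (n : Int) (target : List (Int × Int)) : List (List (Int × Int)) :=
  ((pyd4 P n).foldl (fun st v =>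
      (PySem.List.sorted2
          (PySem.Set.ofList (target.flatMap (fun t => v.map (fun c => (t.1 - c.1, t.2 - c.2)))))
          (fun d => d.1) (fun d => d.2) false).foldl (fun st d =>
        if st.2.any (fun k => PySem.Set.equal k (PySem.Set.ofList (pyshift v d.1 d.2))) then st
        else (st.1 ++ [pyshift v d.1 d.2], st.2 ++ [PySem.Set.ofList (pyshift v d.1 d.2)])) st)
      (([], []) : List (List (Int × Int)) × List (List (Int × Int)))).1

-- ===== PRECONDITION & SPEC =====
-- Pre_ excludes exactly the inputs where A raises: min()/max() of an empty sequence (empty P or empty target).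
def Pre_all_placements_intersecting_target (P : List (Int × Int)) (n : Int) (target : List (Int × Int)) : Prop :=
  P ≠ [] ∧ target ≠ []
instance (P : List (Int × Int)) (n : Int) (target : List (Int × Int)) : Decidable (Pre_all_placements_intersecting_target P n target) := by unfold Pre_all_placements_intersecting_target; infer_instance

def pvWitness_all_placements_intersecting_target : (List (Int × Int)) × Int × (List (Int × Int)) :=
  ([(0, 0), (1, 0)], 2, [(0, 1)])

-- On empty P or empty target A raises ValueError (min() of an empty sequence); B returns [].
def Raises_all_placements_intersecting_target (P : List (Int × Int)) (n : Int) (target : List (Int × Int)) : Prop :=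
  P = [] ∨ target = []
instance (P : List (Int × Int)) (n : Int) (target : List (Int × Int)) : Decidable (Raises_all_placements_intersecting_target P n target) := by unfold Raises_all_placements_intersecting_target; infer_instance

def pvRaiseWitness_all_placements_intersecting_target : (List (Int × Int)) × Int × (List (Int × Int)) :=
  ([], 0, [(0, 0)])
def pvRaiseWitnessOut_all_placements_intersecting_target : List (List (Int × Int)) := []

def Spec_all_placements_intersecting_target (P : List (Int × Int)) (n : Int) (target : List (Int × Int)) (out : List (List (Int × Int))) : Prop := out = all_placements_intersecting_target_alt P n target
instance (P : List (Int × Int)) (n : Int) (target : List (Int × Int)) (out : List (List (Int × Int))) : Decidable (Spec_all_placements_intersecting_target P n target out) := by unfold Spec_all_placements_intersecting_target; infer_instance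

-- ===== CLAIM (what is proved, stated in full; the proofs are below) =====
def Claim_equal_all_placements_intersecting_target : Prop := ∀ (P : List (Int × Int)) (n : Int) (target : List (Int × Int)), Dom_all_placements_intersecting_target P n target → Pre_all_placements_intersecting_target P n target → Spec_all_placements_intersecting_target P n target (all_placements_intersecting_target P n target)

def Claim_raises_all_placements_intersecting_target : Prop := (∀ (P : List (Int × Int)) (n : Int) (target : List (Int × Int)), Dom_all_placements_intersecting_target P n target → Raises_all_placements_intersecting_target P n target → ¬ Pre_all_placements_intersecting_target P n target) ∧ (Dom_all_placements_intersecting_target (pvRaiseWitness_all_placements_intersecting_target.1) (pvRaiseWitness_all_placements_intersecting_target.2.1) (pvRaiseWitness_all_placements_intersecting_target.2.2) ∧ Raises_all_placements_intersecting_target (pvRaiseWitness_all_placements_intersecting_target.1) (pvRaiseWitness_all_placements_intersecting_target.2.1) (pvRaiseWitness_all_placements_intersecting_target.2.2) ∧ all_placements_intersecting_target_alt (pvRaiseWitness_all_placements_intersecting_target.1) (pvRaiseWitness_all_placements_intersecting_target.2.1) (pvRaiseWitness_all_placements_intersecting_target.2.2) = pvRaiseWitnessOut_all_placements_intersecting_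target)

-- ===== LEMMAS AND PROOFS =====

-- strict and reflexive lexicographic order on Int pairs (Python's tuple '<')
def pvLexlt (a b : Int × Int) : Prop := a.1 < b.1 ∨ (a.1 = b.1 ∧ a.2 < b.2)
def pvLexle (a b : Int × Int) : Prop := pvLexlt a b ∨ a = b
def pvBef (a b : Int × Int) : Bool := decide (a.1 < b.1) || (!decide (b.1 < a.1) && decide (a.2 < b.2))

theorem pvBef_true_iff (a b : Int × Int) : pvBef a b = true ↔ pvLexlt a b := by
  unfold pvBef pvLexlt; obtain ⟨a1, a2⟩ := a; obtain ⟨b1, b2⟩ := b; simp; omega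

theorem pvBef_false_lexle (a b : Int × Int) (h : pvBef a b = false) : pvLexle b a := by
  unfold pvBef at h; unfold pvLexle pvLexlt
  obtain ⟨a1, a2⟩ := a; obtain ⟨b1, b2⟩ := b; simp at h ⊢
  rcases h with ⟨h1, h2⟩
  by_cases hlt : b1 < a1
  · exact Or.inl (Or.inl hlt)
  · have : a1 = b1 := by omega
    subst this
    rcases h2 (by omega) with h3
    omega

theorem pvLexle_trans (a b c : Int × Int) (h1 : pvLexle a b) (h2 : pvLexle b c) : pvLexle a c := by
  unfold pvLexle pvLexlt at *
  obtain ⟨a1, a2⟩ := a; obtain ⟨b1, b2⟩ := b; obtain ⟨c1, c2⟩ := c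
  simp [Prod.ext_iff] at *; omega

theorem pvLexlt_ne (a b : Int × Int) (h : pvLexlt a b) : a ≠ b := by
  unfold pvLexlt at h; intro he; subst he; omega

theorem pvLexle_ne_lexlt (a b : Int × Int) (h : pvLexle a b) (hne : a ≠ b) : pvLexlt a b := by
  unfold pvLexle at h
  rcases h with h | h
  · exact h
  · exact absurd h hne

theorem pvLexlt_asymm (a b : Int × Int) (h1 : pvLexlt a b) (h2 : pvLexlt b a) : False := by
  unfold pvLexlt at h1 h2; omega

theorem pairwise_lexle_insertBy (x : Int × Int) (ys : List (Int × Int))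
    (h : List.Pairwise pvLexle ys) : List.Pairwise pvLexle (PySem.List.insertBy pvBef x ys) := by
  induction ys with
  | nil => simp [PySem.List.insertBy]
  | cons y ys ih =>
    rcases List.pairwise_cons.mp h with ⟨h1, h2⟩
    by_cases hb : pvBef x y = true
    · have hins : PySem.List.insertBy pvBef x (y :: ys) = x :: y :: ys := by
        simp [PySem.List.insertBy, hb]
      rw [hins]
      refine List.pairwise_cons.mpr ⟨?_, h⟩
      intro z hz
      rcases List.mem_cons.mp hz with hz | hz
      · rw [hz]; exact Or.inl ((pvBef_true_iff x y).mp hb)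
      · exact pvLexle_trans _ _ _ (Or.inl ((pvBef_true_iff x y).mp hb)) (h1 z hz)
    · have hins : PySem.List.insertBy pvBef x (y :: ys) = y :: PySem.List.insertBy pvBef x ys := by
        simp [PySem.List.insertBy, hb]
      rw [hins]
      refine List.pairwise_cons.mpr ⟨?_, ih h2⟩
      intro z hz
      rcases (PySem.List.mem_insertBy pvBef x z ys).mp hz with hz | hz
      · rw [hz]; exact pvBef_false_lexle x y (by simpa using hb)
      · exact h1 z hz

theorem pairwise_lexle_foldl_insertBy (xs acc : List (Int × Int))
    (h : List.Pairwise pvLexle acc) :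
    List.Pairwise pvLexle (xs.foldl (fun acc x => PySem.List.insertBy pvBef x acc) acc) := by
  induction xs generalizing acc with
  | nil => exact h
  | cons x xs ih => exact ih _ (pairwise_lexle_insertBy x acc h)

theorem sorted2_eq_of_perm_of_pairwise_lexlt (xs ys : List (Int × Int))
    (hperm : ys.Perm xs) (hys : List.Pairwise pvLexlt ys) :
    PySem.List.sorted2 xs (fun d => d.1) (fun d => d.2) false = ys := by
  have hfold : PySem.List.sorted2 xs (fun d => d.1) (fun d => d.2) false
      = xs.foldl (fun acc x => PySem.List.insertBy pvBef x acc) [] := rfl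
  have hp : (PySem.List.sorted2 xs (fun d => d.1) (fun d => d.2) false).Perm ys := by
    rw [hfold]
    exact ((PySem.List.foldl_insertBy_perm pvBef xs []).trans (by simp)).trans hperm.symm
  have hle : List.Pairwise pvLexle (PySem.List.sorted2 xs (fun d => d.1) (fun d => d.2) false) := by
    rw [hfold]; exact pairwise_lexle_foldl_insertBy xs [] (by simp)
  have hndys : ys.Nodup := hys.imp (fun h => pvLexlt_ne _ _ h)
  have hnd : (PySem.List.sorted2 xs (fun d => d.1) (fun d => d.2) false).Nodup :=
    (hp.nodup_iff).mpr hndys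
  have hlt : List.Pairwise pvLexlt (PySem.List.sorted2 xs (fun d => d.1) (fun d => d.2) false) :=
    (hle.and hnd).imp (fun h => pvLexle_ne_lexlt _ _ h.1 h.2)
  exact List.eq_of_perm_of_sorted
    (fun a b _ _ h1 h2 => absurd h2 (fun h2 => pvLexlt_asymm a b h1 h2))
    hlt hys hp

-- membership characterisations
theorem mem_pyshift (v : List (Int × Int)) (dx dy : Int) (z : Int × Int) :
    z ∈ pyshift v dx dy ↔ ∃ c ∈ v, z = (c.1 + dx, c.2 + dy) := by
  unfold pyshift
  rw [PySem.Set.mem_ofList]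
  simp [eq_comm]

theorem pyintersects_iff (v target : List (Int × Int)) (dx dy : Int) :
    pyintersects (pyshift v dx dy) target = true ↔
      ∃ c ∈ v, ∃ t ∈ target, t = (c.1 + dx, c.2 + dy) := by
  unfold pyintersects
  constructor
  · intro h
    split at h <;> rw [List.any_eq_true] at h
    · rcases h with ⟨t, ht, hc⟩
      rw [List.contains_eq_mem, decide_eq_true_iff, mem_pyshift] at hc
      rcases hc with ⟨c, hcv, hz⟩
      exact ⟨c, hcv, t, ht, hz⟩
    · rcases h with ⟨z, hz, hc⟩
      rw [List.contains_eq_mem, decide_eq_true_iff] at hc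
      rw [mem_pyshift] at hz
      rcases hz with ⟨c, hcv, hzc⟩
      exact ⟨c, hcv, z, hc, hzc⟩
  · intro ⟨c, hcv, t, ht, hz⟩
    split <;> rw [List.any_eq_true]
    · exact ⟨t, ht, by rw [List.contains_eq_mem, decide_eq_true_iff, mem_pyshift]; exact ⟨c, hcv, hz⟩⟩
    · exact ⟨t, by rw [mem_pyshift]; exact ⟨c, hcv, hz⟩, by rw [List.contains_eq_mem, decide_eq_true_iff]; exact ht⟩

-- the candidate list A scans (lexicographic (dx,dy) over the bounding-box rectangle, intersecting only)
-- equals B's sorted deduplicated Minkowski difference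
theorem cand_eq (v target : List (Int × Int)) (tminx tmaxx tminy tmaxy vminx vmaxx vminy vmaxy : Int)
    (hT : ∀ t ∈ target, tminx ≤ t.1 ∧ t.1 ≤ tmaxx ∧ tminy ≤ t.2 ∧ t.2 ≤ tmaxy)
    (hV : ∀ c ∈ v, vminx ≤ c.1 ∧ c.1 ≤ vmaxx ∧ vminy ≤ c.2 ∧ c.2 ≤ vmaxy) :
    PySem.List.sorted2
        (PySem.Set.ofList (target.flatMap (fun t => v.map (fun c => (t.1 - c.1, t.2 - c.2)))))
        (fun d => d.1) (fun d => d.2) false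
      = (PySem.List.pyRange (tminx - vmaxx) (tmaxx - vminx + 1) 1).flatMap (fun dx =>
          ((PySem.List.pyRange (tminy - vmaxy) (tmaxy - vminy + 1) 1).filter
              (fun dy => pyintersects (pyshift v dx dy) target)).map (fun dy => (dx, dy))) := by
  have hpw : List.Pairwise pvLexlt
      ((PySem.List.pyRange (tminx - vmaxx) (tmaxx - vminx + 1) 1).flatMap (fun dx =>
        ((PySem.List.pyRange (tminy - vmaxy) (tmaxy - vminy + 1) 1).filter
            (fun dy => pyintersects (pyshift v dx dy) target)).map (fun dy => (dx, dy)))) := by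
    rw [List.pairwise_flatMap]
    constructor
    · intro dx _
      rw [List.pairwise_map]
      exact (List.Pairwise.filter _ (PySem.List.pairwise_lt_pyRange_one _ _)).imp
        (fun h => Or.inr ⟨rfl, h⟩)
    · refine (PySem.List.pairwise_lt_pyRange_one _ _).imp ?_
      intro a b hab x hx y hy
      rcases List.mem_map.mp hx with ⟨da, _, hxa⟩
      rcases List.mem_map.mp hy with ⟨db, _, hyb⟩
      rw [← hxa, ← hyb]
      exact Or.inl hab
  apply sorted2_eq_of_perm_of_pairwise_lexlt _ _ ?_ hpw
  rw [List.perm_ext_iff_of_nodup (hpw.imp (fun h => pvLexlt_ne _ _ h)) (PySem.Set.nodup_ofList _)]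
  intro d
  rw [PySem.Set.mem_ofList]
  simp only [List.mem_flatMap, List.mem_map, List.mem_filter, PySem.List.mem_pyRange_one]
  constructor
  · rintro ⟨dx, hdx, dy, ⟨hdy, hint⟩, rfl⟩
    rcases (pyintersects_iff v target dx dy).mp hint with ⟨c, hc, t, ht, hts⟩
    refine ⟨t, ht, c, hc, ?_⟩
    rw [Prod.ext_iff] at hts
    simp at hts
    rw [Prod.ext_iff]
    constructor <;> simp [hts]
  · rintro ⟨t, ht, c, hc, rfl⟩
    rcases hT t ht with ⟨h1, h2, h3, h4⟩
    rcases hV c hc with ⟨h5, h6, h7, h8⟩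
    refine ⟨t.1 - c.1, ⟨by omega, by omega⟩, t.2 - c.2, ⟨⟨by omega, by omega⟩, ?_⟩, rfl⟩
    exact (pyintersects_iff v target (t.1 - c.1) (t.2 - c.2)).mpr
      ⟨c, hc, t, ht, by rw [Prod.ext_iff]; exact ⟨by simp, by simp⟩⟩

-- dedup step of the placement loop (shared literal shape of both ports' bodies)
theorem per_variant_eq (v target : List (Int × Int)) (tminx tmaxx tminy tmaxy vminx vmaxx vminy vmaxy : Int)
    (hT : ∀ t ∈ target, tminx ≤ t.1 ∧ t.1 ≤ tmaxx ∧ tminy ≤ t.2 ∧ t.2 ≤ tmaxy)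
    (hV : ∀ c ∈ v, vminx ≤ c.1 ∧ c.1 ≤ vmaxx ∧ vminy ≤ c.2 ∧ c.2 ≤ vmaxy)
    (st : List (List (Int × Int)) × List (List (Int × Int))) :
    (PySem.List.pyRange (tminx - vmaxx) (tmaxx - vminx + 1) 1).foldl (fun st dx =>
        (PySem.List.pyRange (tminy - vmaxy) (tmaxy - vminy + 1) 1).foldl (fun st dy =>
          if pyintersects (pyshift v dx dy) target = true then
            if st.2.any (fun k => PySem.Set.equal k (PySem.Set.ofList (pyshift v dx dy))) then st
            else (st.1 ++ [pyshift v dx dy], st.2 ++ [PySem.Set.ofList (pyshift v dx dy)])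
          else st) st) st
      = (PySem.List.sorted2
            (PySem.Set.ofList (target.flatMap (fun t => v.map (fun c => (t.1 - c.1, t.2 - c.2)))))
            (fun d => d.1) (fun d => d.2) false).foldl (fun st d =>
          if st.2.any (fun k => PySem.Set.equal k (PySem.Set.ofList (pyshift v d.1 d.2))) then st
          else (st.1 ++ [pyshift v d.1 d.2], st.2 ++ [PySem.Set.ofList (pyshift v d.1 d.2)])) st := by
  rw [cand_eq v target tminx tmaxx tminy tmaxy vminx vmaxx vminy vmaxy hT hV]
  rw [List.foldl_flatMap]
  apply PySem.List.foldl_congr_mem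
  intro acc dx _
  rw [List.foldl_map, List.foldl_filter]

-- every variant A loops over is nonempty when P is
theorem mem_foldl_pyd4step (l : List (List (Int × Int)))
    (st : List (List (Int × Int)) × List (List (Int × Int))) (v : List (Int × Int))
    (h : v ∈ (l.foldl pyd4step st).1) : v ∈ st.1 ∨ v ∈ l := by
  induction l generalizing st with
  | nil => exact Or.inl h
  | cons w l ih =>
    rcases ih _ h with h' | h'
    · unfold pyd4step at h'
      split at h'
      · exact Or.inl h'
      · simp at h'
        rcases h' with h' | h'
        · exact Or.inl h'
        · subst h'; exact Or.inr (List.mem_cons_self)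
    · exact Or.inr (List.mem_cons_of_mem _ h')

theorem ofList_ne_nil (xs : List (Int × Int)) (h : xs ≠ []) : PySem.Set.ofList xs ≠ [] := by
  rcases List.exists_mem_of_ne_nil xs h with ⟨x, hx⟩
  exact List.ne_nil_of_mem ((PySem.Set.mem_ofList xs x).mpr hx)

theorem map_ne_nil' (xs : List (Int × Int)) (f : Int × Int → Int × Int) (h : xs ≠ []) :
    xs.map f ≠ [] := by simpa using h

theorem pyrot90_ne_nil (xs : List (Int × Int)) (n : Int) (h : xs ≠ []) : pyrot90 xs n ≠ [] :=
  ofList_ne_nil _ (map_ne_nil' _ _ h)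

theorem pyreflx_ne_nil (xs : List (Int × Int)) (n : Int) (h : xs ≠ []) : pyreflx xs n ≠ [] :=
  ofList_ne_nil _ (map_ne_nil' _ _ h)

theorem mem_pyd4_ne_nil (P : List (Int × Int)) (n : Int) (hP : P ≠ []) :
    ∀ v ∈ pyd4 P n, v ≠ [] := by
  intro v hv
  unfold pyd4 at hv
  rcases mem_foldl_pyd4step _ _ _ hv with h | h
  · simp at h
  · simp only [List.mem_cons, List.not_mem_nil, or_false] at h
    rcases h with h | h | h | h | h | h | h | h <;> subst h
    · exact hP
    all_goals first
      | exact pyrot90_ne_nil _ _ hP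
      | exact pyreflx_ne_nil _ _ hP
      | exact pyrot90_ne_nil _ _ (pyrot90_ne_nil _ _ hP)
      | exact pyrot90_ne_nil _ _ (pyrot90_ne_nil _ _ (pyrot90_ne_nil _ _ hP))
      | exact pyreflx_ne_nil _ _ hP
      | exact pyrot90_ne_nil _ _ (pyreflx_ne_nil _ _ hP)
      | exact pyrot90_ne_nil _ _ (pyrot90_ne_nil _ _ (pyreflx_ne_nil _ _ hP))
      | exact pyrot90_ne_nil _ _ (pyrot90_ne_nil _ _ (pyrot90_ne_nil _ _ (pyreflx_ne_nil _ _ hP)))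

-- ===== VERDICT (by name: the statement is the Claim_ definition above) =====
theorem min_max_some {xs : List Int} (h : xs ≠ []) :
    (∃ m, PySem.List.min? xs (fun x => x) = some m) ∧
    (∃ m, PySem.List.max? xs (fun x => x) = some m) := by
  constructor
  · cases hm : PySem.List.min? xs (fun x => x) with
    | none => exact absurd ((PySem.List.min?_eq_none_iff _ _).mp hm) h
    | some m => exact ⟨m, rfl⟩
  · cases hm : PySem.List.max? xs (fun x => x) with
    | none => exact absurd ((PySem.List.max?_eq_none_iff _ _).mp hm) h
    | some m => exact ⟨m, rfl⟩

set_option maxHeartbeats 1000000 in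
theorem all_placements_intersecting_target_spec : Claim_equal_all_placements_intersecting_target := by
  intro P n target _ hpre
  obtain ⟨hP, hTne⟩ := hpre
  unfold Spec_all_placements_intersecting_target
  have htxs : target.map (fun t => t.1) ≠ [] := by simpa using hTne
  have htys : target.map (fun t => t.2) ≠ [] := by simpa using hTne
  obtain ⟨⟨tminx, hminx⟩, ⟨tmaxx, hmaxx⟩⟩ := min_max_some htxs
  obtain ⟨⟨tminy, hminy⟩, ⟨tmaxy, hmaxy⟩⟩ := min_max_some htys
  have hT : ∀ t ∈ target, tminx ≤ t.1 ∧ t.1 ≤ tmaxx ∧ tminy ≤ t.2 ∧ t.2 ≤ tmaxy := by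
    intro t ht
    exact ⟨PySem.List.min?_isMin hminx t.1 (List.mem_map_of_mem ht),
           PySem.List.max?_isMax hmaxx t.1 (List.mem_map_of_mem ht),
           PySem.List.min?_isMin hminy t.2 (List.mem_map_of_mem ht),
           PySem.List.max?_isMax hmaxy t.2 (List.mem_map_of_mem ht)⟩
  simp only [all_placements_intersecting_target, all_placements_intersecting_target_alt,
    hminx, hmaxx, hminy, hmaxy]
  congr 1
  apply PySem.List.foldl_congr_mem
  intro acc v hv
  have hvne := mem_pyd4_ne_nil P n hP v hv
  have hvxs : v.map (fun c => c.1) ≠ [] := by simpa using hvne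
  have hvys : v.map (fun c => c.2) ≠ [] := by simpa using hvne
  obtain ⟨⟨vminx, hvminx⟩, ⟨vmaxx, hvmaxx⟩⟩ := min_max_some hvxs
  obtain ⟨⟨vminy, hvminy⟩, ⟨vmaxy, hvmaxy⟩⟩ := min_max_some hvys
  have hV : ∀ c ∈ v, vminx ≤ c.1 ∧ c.1 ≤ vmaxx ∧ vminy ≤ c.2 ∧ c.2 ≤ vmaxy := by
    intro c hc
    exact ⟨PySem.List.min?_isMin hvminx c.1 (List.mem_map_of_mem hc),
           PySem.List.max?_isMax hvmaxx c.1 (List.mem_map_of_mem hc),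
           PySem.List.min?_isMin hvminy c.2 (List.mem_map_of_mem hc),
           PySem.List.max?_isMax hvmaxy c.2 (List.mem_map_of_mem hc)⟩
  simp only [hvminx, hvmaxx, hvminy, hvmaxy]
  exact per_variant_eq v target tminx tmaxx tminy tmaxy vminx vmaxx vminy vmaxy hT hV acc

@[simp]
theorem all_placements_intersecting_target_raises : Claim_raises_all_placements_intersecting_target := by
  unfold Claim_raises_all_placements_intersecting_target
  refine ⟨?_, by decide⟩
  intro P n target _ hr hpre
  unfold Raises_all_placements_intersecting_target at hr
  unfold Pre_all_placements_intersecting_target at hpre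
  rcases hr with h | h
  · exact hpre.1 h
  · exact hpre.2 h
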